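-- pv_equiv track=rewrite | github.com/eavf/sifra | decrypt_revised2.py | precompute_cipher
-- ===== SOURCE A (Python) =====
-- def precompute_cipher(cipher_text):
--     """
--     Prekonvertuje sifrovany text na pole indexov (0-25).
--     Vrati:
--         indices       – list[int], len = pocet alfa znakov v texte
--         positions_of  – list[list[int]], positions_of[i] = pozicie, kde
--                         sa v 'indices' vyskytuje pismeno s indexom i
--     """
--     indices = []
--     for ch in cipher_text:
--         if ch.isalpha():
--             indices.append(ord(ch.lower()) - ord('a'))
--
--     # Pozicie kazdého pismena v 'indices'
--     positions_of = [[] for _ in range(26)]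
--     for pos, idx in enumerate(indices):
--         positions_of[idx].append(pos)
--
--     return indices, positions_of
-- ===== SOURCE B (Python) =====
-- def precompute_cipher(cipher_text):
--     """Build indices by a comprehension, then build each letter's bucket by
--     selecting its positions from enumerate(indices), instead of distributing
--     positions into buckets with an imperative append loop."""
--     indices = [ord(ch.lower()) - ord('a') for ch in cipher_text if ch.isalpha()]
--     positions_of = [[pos for pos, idx in enumerate(indices) if idx == i]
--                     for i in range(26)]
--     return indices, positions_of
-- ===== Notes on version B (the rewrite author's own statement) =====
-- stated objective: alternative
-- what changed: positions_of is built by per-letter selection -- for each i in range(26) a comprehension picks the positions where indices equals i -- instead of A's imperative distribution loop appending into preallocated buckets; indices becomes a comprehension.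
import Mathlib
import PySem

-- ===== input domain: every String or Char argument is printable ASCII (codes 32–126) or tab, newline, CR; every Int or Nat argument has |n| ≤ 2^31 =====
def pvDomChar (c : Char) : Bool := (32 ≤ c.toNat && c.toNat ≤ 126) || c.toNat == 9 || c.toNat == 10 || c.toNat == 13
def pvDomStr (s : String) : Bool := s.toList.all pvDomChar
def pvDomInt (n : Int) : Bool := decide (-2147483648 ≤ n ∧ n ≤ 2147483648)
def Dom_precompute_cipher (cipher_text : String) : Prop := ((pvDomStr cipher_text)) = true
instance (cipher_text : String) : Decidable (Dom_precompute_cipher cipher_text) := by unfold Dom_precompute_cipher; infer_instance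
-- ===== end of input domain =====

-- B builds positions_of by per-letter selection from enumerate(indices) instead of A's
-- distribution loop appending into preallocated buckets (objective: alternative).

-- ===== PORT A =====
-- positions_of[idx].append(pos): exact for 0 ≤ i < P.length, which holds here (idx ∈ [0,26))
def pvAppendAt (P : List (List Int)) (i : Int) (x : Int) : List (List Int) :=
  P.set i.toNat ((P.getD i.toNat []) ++ [x])

def precompute_cipher (cipher_text : String) : List Int × List (List Int) :=
  let indices := cipher_text.toList.foldl
    (fun acc ch => if PySem.Chars.isalpha ch then
        acc ++ [((PySem.Chars.lowerChar ch).toNat : Int) - 97]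
      else acc) []
  let positions_of := (PySem.List.enumerate indices 0).foldl
    (fun P pi => pvAppendAt P pi.2 pi.1) (List.replicate 26 [])
  (indices, positions_of)

-- ===== PORT B =====
def precompute_cipher_alt (cipher_text : String) : List Int × List (List Int) :=
  let indices := (cipher_text.toList.filter (fun ch => PySem.Chars.isalpha ch)).map
    (fun ch => ((PySem.Chars.lowerChar ch).toNat : Int) - 97)
  (indices,
   (PySem.List.pyRange 0 26 1).map (fun i =>
     ((PySem.List.enumerate indices 0).filter (fun pi => pi.2 == i)).map (fun pi => pi.1)))

-- ===== PRECONDITION & SPEC =====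
def Spec_precompute_cipher (cipher_text : String) (out : List Int × List (List Int)) : Prop := out = precompute_cipher_alt cipher_text
instance (cipher_text : String) (out : List Int × List (List Int)) : Decidable (Spec_precompute_cipher cipher_text out) := by unfold Spec_precompute_cipher; infer_instance

-- ===== CLAIM (what is proved, stated in full; the proofs are below) =====
def Claim_equal_precompute_cipher : Prop := ∀ (cipher_text : String), Dom_precompute_cipher cipher_text → Spec_precompute_cipher cipher_text (precompute_cipher cipher_text)

-- ===== LEMMAS AND PROOFS =====

theorem pv_le_toNat {c d : Char} (h : c ≤ d) : c.toNat ≤ d.toNat :=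
  UInt32.le_iff_toNat_le.mp ((Char.le_def).mp h)

theorem pv_toNat_ofNat (n : Nat) (h : n < 55296) : (Char.ofNat n).toNat = n := by
  have hv : Nat.isValidChar n := Or.inl h
  simp [Char.ofNat, hv, Char.toNat, Char.ofNatAux]

-- the letter index of an alpha char lies in [0, 26)
theorem pv_idx_range (ch : Char) (h : PySem.Chars.isalpha ch = true) :
    0 ≤ ((PySem.Chars.lowerChar ch).toNat : Int) - 97 ∧
    ((PySem.Chars.lowerChar ch).toNat : Int) - 97 < 26 := by
  unfold PySem.Chars.isalpha at h
  rcases Bool.or_eq_true_iff.mp h with hu | hl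
  · have hb : 'A' ≤ ch ∧ ch ≤ 'Z' := by
      unfold PySem.Chars.isupper at hu
      exact ⟨of_decide_eq_true (Bool.and_eq_true_iff.mp hu).1,
             of_decide_eq_true (Bool.and_eq_true_iff.mp hu).2⟩
    have h1 : (65 : Nat) ≤ ch.toNat := pv_le_toNat hb.1
    have h2 : ch.toNat ≤ 90 := pv_le_toNat hb.2
    unfold PySem.Chars.lowerChar
    rw [if_pos hu, pv_toNat_ofNat _ (by omega)]
    omega
  · have hb : 'a' ≤ ch ∧ ch ≤ 'z' := by
      unfold PySem.Chars.islower at hl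
      exact ⟨of_decide_eq_true (Bool.and_eq_true_iff.mp hl).1,
             of_decide_eq_true (Bool.and_eq_true_iff.mp hl).2⟩
    have h1 : (97 : Nat) ≤ ch.toNat := pv_le_toNat hb.1
    have h2 : ch.toNat ≤ 122 := pv_le_toNat hb.2
    have hnu : PySem.Chars.isupper ch = false := by
      unfold PySem.Chars.isupper
      have hz : (decide (ch ≤ 'Z')) = false :=
        decide_eq_false (fun hc => by
          have h3 : ch.toNat ≤ 90 := pv_le_toNat hc; omega)
      simp [hz]
    unfold PySem.Chars.lowerChar
    rw [hnu]
    simp only [Bool.false_eq_true, if_false]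
    omega

-- distributing (pos, idx) pairs into 26 buckets = selecting each bucket's pairs
theorem pv_distribute (ps : List (Int × Int)) (P : List (List Int))
    (hP : P.length = 26) (hb : ∀ pi ∈ ps, 0 ≤ pi.2 ∧ pi.2 < 26) :
    ps.foldl (fun Q pi => pvAppendAt Q pi.2 pi.1) P
    = (PySem.List.pyRange 0 26 1).map (fun i =>
        P.getD i.toNat [] ++ ((ps.filter (fun pi => pi.2 == i)).map (fun pi => pi.1))) := by
  induction ps generalizing P with
  | nil =>
    simp only [List.foldl_nil, List.filter_nil, List.map_nil, List.append_nil]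
    apply List.ext_getElem
    · simp [PySem.List.length_pyRange_one, hP]
    · intro k hk1 hk2
      simp only [List.getElem_map, PySem.List.getElem_pyRange_one]
      have hkn : ((0 : Int) + (k : Int)).toNat = k := by omega
      rw [hkn, List.getD_eq_getElem _ _ (by omega)]
  | cons p ps ih =>
    have hp := hb p (List.mem_cons_self)
    have hlen : (pvAppendAt P p.2 p.1).length = 26 := by simp [pvAppendAt, hP]
    rw [List.foldl_cons, ih (pvAppendAt P p.2 p.1) hlen
        (fun pi hpi => hb pi (List.mem_cons_of_mem _ hpi))]
    apply List.map_congr_left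
    intro i hi
    have hi' := (PySem.List.mem_pyRange_one).1 hi
    by_cases hip : i = p.2
    · subst hip
      have ht : p.2.toNat < P.length := by omega
      have hset : (pvAppendAt P p.2 p.1).getD p.2.toNat [] = P.getD p.2.toNat [] ++ [p.1] := by
        unfold pvAppendAt
        rw [List.getD_eq_getElem _ _ (by simpa)]
        simp
      rw [hset]
      simp
    · have htn : p.2.toNat ≠ i.toNat := by omega
      have hset : (pvAppendAt P p.2 p.1).getD i.toNat [] = P.getD i.toNat [] := by
        simp [pvAppendAt, List.getD, List.getElem?_set_ne htn]
      rw [hset]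
      have hne : (p.2 == i) = false := by simp; omega
      simp [hne]

-- ===== VERDICT (by name: the statement is the Claim_ definition above) =====
theorem precompute_cipher_spec : Claim_equal_precompute_cipher := by
  intro s _
  unfold Spec_precompute_cipher precompute_cipher precompute_cipher_alt
  rw [PySem.List.foldl_append_if]
  simp only [List.nil_append]
  congr 1
  rw [pv_distribute _ (List.replicate 26 []) (by simp)]
  · apply List.map_congr_left
    intro i hi
    have hi' := (PySem.List.mem_pyRange_one).1 hi
    rw [List.getD_replicate _ (by omega)]
    simp
  · intro pi hpi
    have h2 := PySem.List.map_snd_enumerate ((s.toList.filter (fun ch => PySem.Chars.isalpha ch)).map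
      (fun ch => ((PySem.Chars.lowerChar ch).toNat : Int) - 97)) 0
    have hmem : pi.2 ∈ (s.toList.filter (fun ch => PySem.Chars.isalpha ch)).map
        (fun ch => ((PySem.Chars.lowerChar ch).toNat : Int) - 97) := by
      rw [← h2]; exact List.mem_map_of_mem hpi
    obtain ⟨ch, hch, hv⟩ := List.mem_map.1 hmem
    have := pv_idx_range ch (List.of_mem_filter hch)
    omega
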